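-- pv_equiv track=rewrite | github.com/zbw-pkuphy/pku_courses | 数算B/codes/oj06648.py | refresh
-- ===== SOURCE A (Python) =====
-- import heapq
--
-- def refresh(min_sum,temp):
--     n=len(temp)
--     heap0=[]
--     new_sum=[]
--     for i in range(len(min_sum)):
--         heapq.heappush(heap0, (min_sum[i]+temp[0], i, 0))
--     while len(new_sum)<n and heap0:
--         val,i,j = heapq.heappop(heap0)
--         new_sum.append(val)
--         if j+1 < n:
--             heapq.heappush(heap0,(min_sum[i]+temp[j+1],i,j+1))
--
--     return new_sum
-- ===== SOURCE B (Python) =====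
-- def refresh(min_sum, temp):
--     n = len(temp)
--     cursors = [(i, 0) for i in range(len(min_sum))]
--     new_sum = []
--     while len(new_sum) < n and cursors:
--         bi, bj = min(cursors, key=lambda c: (min_sum[c[0]] + temp[c[1]], c[0]))
--         new_sum.append(min_sum[bi] + temp[bj])
--         cursors = [(i, j + 1 if i == bi else j) for (i, j) in cursors if i != bi or j + 1 < n]
--     return new_sum
-- ===== Notes on version B (the rewrite author's own statement) =====
-- stated objective: alternative
-- what changed: Replaces the heap of (sum,i,j) tuples by a list of per-row cursors (i,j): each round picks the row minimizing (min_sum[i]+temp[j], i) with min(key=...) and rebuilds the cursor list by a comprehension that advances or drops that row, recomputing sums on demand instead of storing them.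
import Mathlib
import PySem

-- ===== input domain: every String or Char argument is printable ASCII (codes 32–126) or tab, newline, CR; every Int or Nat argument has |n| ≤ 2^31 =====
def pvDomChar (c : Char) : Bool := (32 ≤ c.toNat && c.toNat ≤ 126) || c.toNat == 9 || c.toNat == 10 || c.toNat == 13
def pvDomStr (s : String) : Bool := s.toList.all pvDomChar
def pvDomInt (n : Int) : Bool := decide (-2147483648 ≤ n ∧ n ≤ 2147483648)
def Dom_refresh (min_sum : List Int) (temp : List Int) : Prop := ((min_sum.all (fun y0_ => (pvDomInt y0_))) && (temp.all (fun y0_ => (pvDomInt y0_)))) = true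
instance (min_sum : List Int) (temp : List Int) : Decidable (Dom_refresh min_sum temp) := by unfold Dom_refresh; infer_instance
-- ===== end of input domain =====

-- B replaces the heap of (sum,i,j) tuples by a list of per-row cursors (i,j), selected with min(key=…) and rebuilt by a comprehension; alternative structure, not faster.

-- ===== PORT A =====
-- Python `<` on the (val, i, j) tuples (i, j are the nonnegative list indices)
def tlt (a b : Int × Nat × Nat) : Bool :=
  decide (a.1 < b.1) ||
    (decide (a.1 = b.1) && (decide (a.2.1 < b.2.1) ||
      (decide (a.2.1 = b.2.1) && decide (a.2.2 < b.2.2))))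

-- heapq is modelled by its priority-queue semantics: the heap is kept as a list
-- sorted by Python tuple order; heappush = ordered insert, heappop = take the head.
-- Observationally exact for refresh: heappop always returns the minimum tuple.
def hinsert (x : Int × Nat × Nat) : List (Int × Nat × Nat) → List (Int × Nat × Nat)
  | [] => [x]
  | y :: ys => if tlt x y then x :: y :: ys else y :: hinsert x ys

def heappush (h : List (Int × Nat × Nat)) (x : Int × Nat × Nat) : List (Int × Nat × Nat) :=
  hinsert x h

-- the `while len(new_sum) < n and heap0:` loop of A
def refreshLoop (min_sum temp : List Int) (n : Nat) :
    List (Int × Nat × Nat) → List Int → List Int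
  | heap, acc =>
    if acc.length < n then
      match heap with
      | [] => acc
      | (val, i, j) :: rest =>
        let acc' := acc ++ [val]
        let heap' := if j + 1 < n then
            heappush rest (min_sum.getD i 0 + temp.getD (j + 1) 0, i, j + 1)
          else rest
        refreshLoop min_sum temp n heap' acc'
    else acc
  termination_by heap acc => n - acc.length
  decreasing_by simp [List.length_append]; omega

def refresh (min_sum : List Int) (temp : List Int) : List Int :=
  let n := temp.length
  let heap0 := (List.range min_sum.length).foldl
    (fun h i => heappush h (min_sum.getD i 0 + temp.getD 0 0, i, 0)) []
  refreshLoop min_sum temp n heap0 []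

-- ===== PORT B =====
-- the `while len(new_sum) < n and cursors:` loop of B; `min(cursors, key=…)` is
-- PySem.List.min2? (first minimum under the tuple key), the comprehension is a filterMap
def refreshAltLoop (min_sum temp : List Int) (n : Nat) :
    List (Nat × Nat) → List Int → List Int
  | cursors, acc =>
    if acc.length < n then
      match cursors with
      | [] => acc
      | c :: cs =>
        match PySem.List.min2? (c :: cs)
            (fun q => min_sum.getD q.1 0 + temp.getD q.2 0) (fun q => q.1) with
        | none => acc   -- unreachable: min() of a nonempty list
        | some b =>
          let acc' := acc ++ [min_sum.getD b.1 0 + temp.getD b.2 0]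
          let cursors' := (c :: cs).filterMap (fun q =>
            if q.1 ≠ b.1 ∨ q.2 + 1 < n then
              some (q.1, if q.1 = b.1 then q.2 + 1 else q.2)
            else none)
          refreshAltLoop min_sum temp n cursors' acc'
    else acc
  termination_by cursors acc => n - acc.length
  decreasing_by simp [List.length_append]; omega

def refresh_alt (min_sum : List Int) (temp : List Int) : List Int :=
  let n := temp.length
  let cursors0 := (List.range min_sum.length).map (fun i => (i, 0))
  refreshAltLoop min_sum temp n cursors0 []

-- ===== PRECONDITION & SPEC =====
-- Pre_ excludes exactly the inputs on which Python A raises IndexError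
-- (temp[0] with min_sum nonempty and temp empty).
def Pre_refresh (min_sum : List Int) (temp : List Int) : Prop :=
  min_sum = [] ∨ temp ≠ []
instance (min_sum : List Int) (temp : List Int) : Decidable (Pre_refresh min_sum temp) := by
  unfold Pre_refresh; infer_instance

def pvWitness_refresh : List Int × List Int := ([3, 1, 2], [0, 5])

def Spec_refresh (min_sum : List Int) (temp : List Int) (out : List Int) : Prop := out = refresh_alt min_sum temp
instance (min_sum : List Int) (temp : List Int) (out : List Int) : Decidable (Spec_refresh min_sum temp out) := by unfold Spec_refresh; infer_instance

-- ===== CLAIM (what is proved, stated in full; the proofs are below) =====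
def Claim_equal_refresh : Prop := ∀ (min_sum : List Int) (temp : List Int), Dom_refresh min_sum temp → Pre_refresh min_sum temp → Spec_refresh min_sum temp (refresh min_sum temp)

-- ===== LEMMAS AND PROOFS =====

-- "a ≤ b" in Python tuple order
def tleP (a b : Int × Nat × Nat) : Prop := tlt b a = false

-- a cursor (i, j) as the tuple A keeps on the heap
def toT (ms t : List Int) (c : Nat × Nat) : Int × Nat × Nat :=
  (ms.getD c.1 0 + t.getD c.2 0, c.1, c.2)

-- "key b ≤ key y" for B's min key (sum, row)
def lexle (ms t : List Int) (b y : Nat × Nat) : Prop :=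
  ms.getD b.1 0 + t.getD b.2 0 < ms.getD y.1 0 + t.getD y.2 0 ∨
    (ms.getD b.1 0 + t.getD b.2 0 = ms.getD y.1 0 + t.getD y.2 0 ∧ b.1 ≤ y.1)

lemma tlt_irrefl (a : Int × Nat × Nat) : tlt a a = false := by
  obtain ⟨a1, a2, a3⟩ := a; simp [tlt]

lemma tlt_asymm {a b : Int × Nat × Nat} (h : tlt a b = true) : tlt b a = false := by
  obtain ⟨a1, a2, a3⟩ := a; obtain ⟨b1, b2, b3⟩ := b
  simp [tlt] at h ⊢; omega

lemma tlt_trans {a b c : Int × Nat × Nat} (h1 : tlt a b = true) (h2 : tlt b c = true) :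
    tlt a c = true := by
  obtain ⟨a1, a2, a3⟩ := a; obtain ⟨b1, b2, b3⟩ := b; obtain ⟨c1, c2, c3⟩ := c
  simp [tlt] at h1 h2 ⊢; omega

lemma hinsert_perm (x : Int × Nat × Nat) (l : List (Int × Nat × Nat)) :
    (hinsert x l).Perm (x :: l) := by
  induction l with
  | nil => simp [hinsert]
  | cons y ys ih =>
    simp only [hinsert]
    split
    · exact List.Perm.refl _
    · exact (ih.cons y).trans (List.Perm.swap x y ys)

lemma hinsert_sorted {l : List (Int × Nat × Nat)} (x : Int × Nat × Nat)
    (h : l.Pairwise tleP) : (hinsert x l).Pairwise tleP := by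
  induction l with
  | nil => simp [hinsert, tleP]
  | cons y ys ih =>
    rcases List.pairwise_cons.mp h with ⟨hy, hys⟩
    simp only [hinsert]
    split
    · rename_i hxy
      refine List.pairwise_cons.mpr ⟨?_, h⟩
      intro z hz
      rcases List.mem_cons.mp hz with rfl | hz'
      · exact tlt_asymm hxy
      · unfold tleP
        cases h' : tlt z x with
        | false => rfl
        | true =>
          have := tlt_trans h' hxy
          rw [hy z hz'] at this
          exact absurd this (by simp)
    · rename_i hxy
      refine List.pairwise_cons.mpr ⟨?_, ih hys⟩
      intro z hz
      have hz' := (hinsert_perm x ys).mem_iff.mp hz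
      rcases List.mem_cons.mp hz' with rfl | hz''
      · unfold tleP; simpa using hxy
      · exact hy z hz''

lemma sorted_head_min {a : Int × Nat × Nat} {as : List (Int × Nat × Nat)}
    (hs : (a :: as).Pairwise tleP) : ∀ y ∈ a :: as, tlt y a = false := by
  intro y hy
  rcases List.mem_cons.mp hy with rfl | hy'
  · exact tlt_irrefl y
  · exact (List.pairwise_cons.mp hs).1 y hy'

-- the fold inside PySem.List.min2?, specialized to B's keys
def mstep (ms t : List Int) (acc : Option (Nat × Nat)) (x : Nat × Nat) : Option (Nat × Nat) :=
  match acc with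
  | none => some x
  | some m =>
    if (decide (ms.getD x.1 0 + t.getD x.2 0 < ms.getD m.1 0 + t.getD m.2 0) ||
        (!decide (ms.getD m.1 0 + t.getD m.2 0 < ms.getD x.1 0 + t.getD x.2 0) &&
          decide (x.1 < m.1))) = true then some x else some m

lemma min2?_eq_mstep (ms t : List Int) (xs : List (Nat × Nat)) :
    PySem.List.min2? xs (fun q => ms.getD q.1 0 + t.getD q.2 0) (fun q => q.1)
      = xs.foldl (mstep ms t) none := by
  unfold PySem.List.min2? mstep
  congr 1
  funext acc x
  cases acc <;> rfl

lemma lexle_trans {ms t : List Int} {a b c : Nat × Nat}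
    (h1 : lexle ms t a b) (h2 : lexle ms t b c) : lexle ms t a c := by
  unfold lexle at *; omega

lemma mstep_run (ms t : List Int) :
    ∀ (cs : List (Nat × Nat)) (m : Nat × Nat),
      ∃ b, cs.foldl (mstep ms t) (some m) = some b ∧ b ∈ m :: cs ∧
        ∀ y ∈ m :: cs, lexle ms t b y := by
  intro cs
  induction cs with
  | nil =>
    intro m
    exact ⟨m, rfl, by simp, by intro y hy; simp at hy; subst hy; simp [lexle]⟩
  | cons x cs ih =>
    intro m
    simp only [List.foldl_cons]
    by_cases hc : (decide (ms.getD x.1 0 + t.getD x.2 0 < ms.getD m.1 0 + t.getD m.2 0) ||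
        (!decide (ms.getD m.1 0 + t.getD m.2 0 < ms.getD x.1 0 + t.getD x.2 0) &&
          decide (x.1 < m.1))) = true
    · have hstep : mstep ms t (some m) x = some x := by
        simp only [mstep]; rw [if_pos hc]
      rw [hstep]
      obtain ⟨b, hb1, hb2, hb3⟩ := ih x
      refine ⟨b, hb1, ?_, ?_⟩
      · rcases List.mem_cons.mp hb2 with rfl | h
        · simp
        · simp [List.mem_cons.mpr (Or.inr h)]
      · intro y hy
        have hxm : lexle ms t x m := by
          simp at hc; simp [lexle]; omega
        rcases List.mem_cons.mp hy with rfl | h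
        · exact lexle_trans (hb3 x List.mem_cons_self) hxm
        · exact hb3 y h
    · have hstep : mstep ms t (some m) x = some m := by
        simp only [mstep]; rw [if_neg hc]
      rw [hstep]
      obtain ⟨b, hb1, hb2, hb3⟩ := ih m
      refine ⟨b, hb1, ?_, ?_⟩
      · rcases List.mem_cons.mp hb2 with rfl | h
        · simp
        · simp [List.mem_cons.mpr (Or.inr h)]
      · intro y hy
        have hmx : lexle ms t m x := by
          simp at hc; simp [lexle]; omega
        rcases List.mem_cons.mp hy with rfl | h
        · exact hb3 y List.mem_cons_self
        · rcases List.mem_cons.mp h with rfl | h'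
          · exact lexle_trans (hb3 m List.mem_cons_self) hmx
          · exact hb3 y (List.mem_cons_of_mem _ h')

-- the comprehension leaves rows other than b.1 untouched
lemma filterMap_other (n : Nat) (b : Nat × Nat) :
    ∀ (u : List (Nat × Nat)), (∀ c ∈ u, c.1 ≠ b.1) →
      u.filterMap (fun q => if q.1 ≠ b.1 ∨ q.2 + 1 < n then
          some (q.1, if q.1 = b.1 then q.2 + 1 else q.2) else none) = u := by
  intro u
  induction u with
  | nil => intro _; rfl
  | cons c cs ih =>
    intro h
    have hc : c.1 ≠ b.1 := h c List.mem_cons_self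
    simp only [List.filterMap_cons, if_pos (Or.inl hc), if_neg hc]
    rw [ih (fun d hd => h d (List.mem_cons_of_mem _ hd))]

lemma fst_eq_of_mem_of_nodup {l : List (Nat × Nat)} (hnd : (l.map Prod.fst).Nodup)
    {x y : Nat × Nat} (hx : x ∈ l) (hy : y ∈ l) (hxy : x.1 = y.1) : x = y :=
  List.inj_on_of_nodup_map hnd hx hy hxy

-- the two loops agree: A's heap-list is sorted and is (as a multiset) the image of B's cursors
lemma loop_eq (ms t : List Int) (n : Nat) (hn : n = t.length) :
    ∀ (k : Nat) (A : List (Int × Nat × Nat)) (B : List (Nat × Nat)) (acc : List Int),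
      n - acc.length ≤ k → A.Pairwise tleP → A.Perm (B.map (toT ms t)) →
      (B.map Prod.fst).Nodup →
      refreshLoop ms t n A acc = refreshAltLoop ms t n B acc := by
  intro k
  induction k with
  | zero =>
    intro A B acc hk _ _ _
    rw [refreshLoop.eq_def, refreshAltLoop.eq_def]
    have h : ¬ acc.length < n := by omega
    simp [h]
  | succ k ih =>
    intro A B acc hk hs hp hnd
    rw [refreshLoop.eq_def, refreshAltLoop.eq_def]
    by_cases hlt : acc.length < n
    · simp only [hlt, if_true]
      cases A with
      | nil =>
        have hB : B.map (toT ms t) = [] := hp.symm.eq_nil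
        rw [List.map_eq_nil_iff] at hB
        subst hB; rfl
      | cons a rest =>
        cases B with
        | nil => exact absurd hp.eq_nil (List.cons_ne_nil a rest)
        | cons c cs =>
          -- B's min() succeeds and returns b
          obtain ⟨b, hb1, hb2, hb3⟩ := mstep_run ms t cs c
          have hmin : PySem.List.min2? (c :: cs)
              (fun q => ms.getD q.1 0 + t.getD q.2 0) (fun q => q.1) = some b := by
            rw [min2?_eq_mstep]
            simpa [List.foldl_cons, mstep] using hb1
          simp only [hmin]
          -- a is the image of some cursor c''
          have ha : a ∈ (c :: cs).map (toT ms t) := hp.subset List.mem_cons_self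
          obtain ⟨c'', hc''mem, hc''⟩ := List.mem_map.mp ha
          -- a = toT b
          have htb : toT ms t b ∈ a :: rest :=
            hp.symm.subset (List.mem_map_of_mem hb2)
          have h1 : tlt (toT ms t b) a = false := sorted_head_min hs _ htb
          have h2 : lexle ms t b c'' := hb3 c'' hc''mem
          have hbc : b = c'' := by
            apply fst_eq_of_mem_of_nodup hnd hb2 hc''mem
            obtain ⟨b1, b2⟩ := b; obtain ⟨d1, d2⟩ := c''
            rw [← hc''] at h1
            simp [toT, tlt] at h1
            simp [lexle] at h2
            simp
            omega
          have ha_eq : a = toT ms t b := by rw [hbc]; exact hc''.symm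
          obtain ⟨av, ai, aj⟩ := a
          have h3 : av = ms.getD b.1 0 + t.getD b.2 0 ∧ ai = b.1 ∧ aj = b.2 := by
            simpa [toT, Prod.ext_iff] using ha_eq
          obtain ⟨hav, hai, haj⟩ := h3
          subst hav hai haj
          -- split B's cursor list around b
          obtain ⟨u, v, huv⟩ := List.append_of_mem hb2
          rw [huv] at hp hnd ⊢
          have hndm : ((u.map Prod.fst) ++ b.1 :: (v.map Prod.fst)).Nodup := by
            simpa using hnd
          have hnm := List.nodup_cons.mp (List.nodup_middle.mp hndm)
          have hbu : ∀ d ∈ u, d.1 ≠ b.1 := by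
            intro d hd hcon
            exact hnm.1 (by
              simp only [List.mem_append]
              exact Or.inl (hcon ▸ List.mem_map_of_mem hd))
          have hbv : ∀ d ∈ v, d.1 ≠ b.1 := by
            intro d hd hcon
            exact hnm.1 (by
              simp only [List.mem_append]
              exact Or.inr (hcon ▸ List.mem_map_of_mem hd))
          -- rest is the image of u ++ v
          have hrest : rest.Perm ((u ++ v).map (toT ms t)) := by
            have hmid : (u ++ b :: v).map (toT ms t) =
                u.map (toT ms t) ++ toT ms t b :: v.map (toT ms t) := by simp
            have := hp
            rw [hmid] at this
            have h3 : (toT ms t b :: rest).Perm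
                (toT ms t b :: (u.map (toT ms t) ++ v.map (toT ms t))) :=
              this.trans List.perm_middle
            have := h3.cons_inv
            simpa using this
          -- the rebuilt cursor list
          set f : Nat × Nat → Option (Nat × Nat) := fun q =>
            if q.1 ≠ b.1 ∨ q.2 + 1 < n then
              some (q.1, if q.1 = b.1 then q.2 + 1 else q.2) else none with hf
          have hfb : f b = if b.2 + 1 < n then some (b.1, b.2 + 1) else none := by
            by_cases hj : b.2 + 1 < n <;> simp [hf, hj]
          have hcur : (u ++ b :: v).filterMap f =
              u ++ (if b.2 + 1 < n then [(b.1, b.2 + 1)] else []) ++ v := by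
            rw [List.filterMap_append, filterMap_other n b u hbu,
              List.filterMap_cons, filterMap_other n b v hbv]
            by_cases hj : b.2 + 1 < n <;> simp [hfb, hj]
          rw [hcur]
          have hs' : rest.Pairwise tleP := (List.pairwise_cons.mp hs).2
          by_cases hpush : b.2 + 1 < n
          · rw [if_pos hpush, if_pos hpush]
            apply ih
            · simp [List.length_append]; omega
            · exact hinsert_sorted _ hs'
            · -- heap' ~ image of u ++ [(b.1, b.2+1)] ++ v
              refine (hinsert_perm _ _).trans ?_
              have : ((ms.getD b.1 0 + t.getD (b.2 + 1) 0, b.1, b.2 + 1) :: rest).Perm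
                  ((toT ms t (b.1, b.2 + 1)) :: (u ++ v).map (toT ms t)) :=
                (hrest.cons _)
              refine this.trans ?_
              simp only [List.map_append]
              have : (toT ms t (b.1, b.2 + 1) :: (u.map (toT ms t) ++ v.map (toT ms t))).Perm
                  (u.map (toT ms t) ++ toT ms t (b.1, b.2 + 1) :: v.map (toT ms t)) :=
                List.perm_middle.symm
              simpa using this
            · -- fst-nodup of u ++ [(b.1, b.2+1)] ++ v
              simpa using hndm
          · rw [if_neg hpush, if_neg hpush]
            apply ih
            · simp [List.length_append]; omega
            · exact hs'
            · simpa using hrest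
            · have := (List.nodup_cons.mp (List.nodup_middle.mp hndm)).2
              simpa using this
    · simp [hlt]

lemma fold_push (f : Nat → Int × Nat × Nat) :
    ∀ (l : List Nat) (acc : List (Int × Nat × Nat)), acc.Pairwise tleP →
      (l.foldl (fun h i => heappush h (f i)) acc).Pairwise tleP ∧
      (l.foldl (fun h i => heappush h (f i)) acc).Perm (acc ++ l.map f) := by
  intro l
  induction l with
  | nil => intro acc h; simpa using h
  | cons i is ih =>
    intro acc h
    simp only [List.foldl_cons, List.map_cons]
    obtain ⟨hp1, hp2⟩ := ih (heappush acc (f i)) (hinsert_sorted _ h)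
    refine ⟨hp1, hp2.trans ?_⟩
    have h1 : (heappush acc (f i) ++ is.map f).Perm ((f i :: acc) ++ is.map f) :=
      (hinsert_perm _ _).append_right _
    refine h1.trans ?_
    rw [List.cons_append]
    exact List.perm_middle.symm

-- ===== VERDICT (by name: the statement is the Claim_ definition above) =====
theorem refresh_spec : Claim_equal_refresh := by
  intro ms t _ _
  unfold Spec_refresh refresh refresh_alt
  obtain ⟨hsort, hperm⟩ := fold_push (fun i => (ms.getD i 0 + t.getD 0 0, i, 0))
    (List.range ms.length) [] (by simp)
  have hp2 : ((List.range ms.length).foldl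
      (fun h i => heappush h (ms.getD i 0 + t.getD 0 0, i, 0)) []).Perm
      (((List.range ms.length).map (fun i => (i, 0))).map (toT ms t)) := by
    rw [List.map_map]
    simpa [toT, Function.comp] using hperm
  exact loop_eq ms t t.length rfl t.length _ _ [] (by omega) hsort hp2
    (by simpa [Function.comp_def] using List.nodup_range (n := ms.length))
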